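-- pv_equiv track=rewrite | github.com/gfrmin/bayesian-if | src/bayesian_if/tools.py | _best_action_matching
-- ===== SOURCE A (Python) =====
-- def _best_action_matching(
--     valid_actions: list[str], keywords: list[str]
-- ) -> int | None:
--     """Return the index of the valid action best matching the keywords, or None."""
--     best_idx: int | None = None
--     best_score = 0
--     for i, action in enumerate(valid_actions):
--         action_lower = action.lower()
--         score = sum(1 for kw in keywords if kw.lower() in action_lower)
--         if score > best_score:
--             best_score = score
--             best_idx = i
--     return best_idx
-- ===== SOURCE B (Python) =====
-- def _best_action_matching(
--     valid_actions: list[str], keywords: list[str]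
-- ) -> int | None:
--     """Return the index of the valid action best matching the keywords, or None."""
--     lowered = [a.lower() for a in valid_actions]
--     counts = [0] * len(valid_actions)
--     for kw in keywords:
--         k = kw.lower()
--         counts = [c + 1 if k in a else c for c, a in zip(counts, lowered)]
--     best = max(counts, default=0)
--     return counts.index(best) if best > 0 else None
-- ===== Notes on version B (the rewrite author's own statement) =====
-- stated objective: alternative
-- what changed: Transposes the loop nesting: instead of A's action-major running-best scan (score each action against all keywords, update best on strict improvement), B iterates keyword-major, maintaining a per-action count vector updated across all actions for each keyword (each string lowered exactly once), then selects the first positive maximum from that vector in a separate pass.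
import Mathlib
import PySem

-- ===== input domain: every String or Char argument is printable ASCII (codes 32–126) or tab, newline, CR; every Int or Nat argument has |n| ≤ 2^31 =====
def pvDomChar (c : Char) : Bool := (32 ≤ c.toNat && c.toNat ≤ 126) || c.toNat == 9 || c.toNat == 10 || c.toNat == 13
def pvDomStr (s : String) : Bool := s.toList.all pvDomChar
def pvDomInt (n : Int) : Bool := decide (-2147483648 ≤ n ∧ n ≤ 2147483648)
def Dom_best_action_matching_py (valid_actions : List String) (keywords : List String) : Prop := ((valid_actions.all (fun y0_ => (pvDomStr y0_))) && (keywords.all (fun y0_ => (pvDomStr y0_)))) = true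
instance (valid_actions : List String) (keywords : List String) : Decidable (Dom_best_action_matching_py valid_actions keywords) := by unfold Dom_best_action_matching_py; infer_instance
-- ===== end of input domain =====

-- B transposes A's loops: a keyword-major pass updates a per-action count vector (each string lowered once), then a separate pass selects the first positive maximum (objective: alternative).

-- ===== PORT A =====
def best_action_matching_py (valid_actions : List String) (keywords : List String) : Option Int :=
  ((PySem.List.enumerate valid_actions 0).foldl
    (fun (st : Option Int × Int) p =>
      let action_lower := PySem.Str.lower p.2
      let score : Int := keywords.foldl
        (fun acc kw => if PySem.Str.isIn (PySem.Str.lower kw) action_lower then acc + 1 else acc) 0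
      if st.2 < score then (some p.1, score) else st)
    (none, 0)).1

-- ===== PORT B =====
def best_action_matching_py_alt (valid_actions : List String) (keywords : List String) : Option Int :=
  let lowered := valid_actions.map PySem.Str.lower
  let counts : List Int := keywords.foldl
    (fun cs kw =>
      let k := PySem.Str.lower kw
      List.zipWith (fun c a => if PySem.Str.isIn k a then c + 1 else c) cs lowered)
    (List.replicate valid_actions.length (0 : Int))
  let best : Int := match PySem.List.max? counts (fun x => x) with
    | none => 0
    | some m => m
  if 0 < best then (PySem.List.index? counts best).map (fun k => (k : Int)) else none

-- ===== PRECONDITION & SPEC =====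
def Spec_best_action_matching_py (valid_actions : List String) (keywords : List String) (out : Option Int) : Prop := out = best_action_matching_py_alt valid_actions keywords
instance (valid_actions : List String) (keywords : List String) (out : Option Int) : Decidable (Spec_best_action_matching_py valid_actions keywords out) := by unfold Spec_best_action_matching_py; infer_instance

-- ===== CLAIM =====
def Claim_equal_best_action_matching_py : Prop := ∀ (valid_actions : List String) (keywords : List String), Dom_best_action_matching_py valid_actions keywords → Spec_best_action_matching_py valid_actions keywords (best_action_matching_py valid_actions keywords)

-- ===== LEMMAS AND PROOFS =====

-- the per-action score both programs compute, on an already-lowered action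
def pvScoreL (keywords : List String) (a : String) : Int :=
  (keywords.map (fun kw => if PySem.Str.isIn (PySem.Str.lower kw) a then (1 : Int) else 0)).sum

theorem pvScoreL_nonneg (keywords : List String) (a : String) : 0 ≤ pvScoreL keywords a := by
  unfold pvScoreL
  induction keywords with
  | nil => simp
  | cons k t ih => simp only [List.map_cons, List.sum_cons]; split_ifs <;> omega

-- A's inner foldl computes pvScoreL on the lowered action
theorem scoreA_eq (keywords : List String) (action : String) :
    keywords.foldl
      (fun acc kw => if PySem.Str.isIn (PySem.Str.lower kw) (PySem.Str.lower action) then acc + 1 else acc) 0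
    = pvScoreL keywords (PySem.Str.lower action) := by
  unfold pvScoreL
  rw [PySem.List.foldl_if_add_one, PySem.List.sum_map_ite_one_zero]
  omega

-- zipWith composed on the left fuses
theorem zipWith_zipWith_left {α β : Type} (f g : α → β → α) :
    ∀ (cs : List α) (la : List β),
    List.zipWith f (List.zipWith g cs la) la = List.zipWith (fun c a => f (g c a) a) cs la := by
  intro cs
  induction cs with
  | nil => intro la; simp
  | cons c t ih =>
    intro la
    cases la with
    | nil => simp
    | cons a ta => simp [List.zipWith, ih]

-- B's keyword-major fold equals per-action summation
theorem countsB_eq (keywords : List String) :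
    ∀ (cs : List Int) (la : List String), cs.length = la.length →
    keywords.foldl
      (fun cs kw => List.zipWith (fun c a => if PySem.Str.isIn (PySem.Str.lower kw) a then c + 1 else c) cs la)
      cs
    = List.zipWith (fun c a => c + pvScoreL keywords a) cs la := by
  induction keywords with
  | nil =>
    intro cs la h
    simp only [List.foldl_nil, pvScoreL, List.map_nil, List.sum_nil, add_zero]
    induction cs generalizing la with
    | nil => simp
    | cons c t ih =>
      cases la with
      | nil => simp at h
      | cons a ta =>
        simp only [List.zipWith_cons_cons]
        exact congrArg (c :: ·) (ih ta (by simpa using h))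
  | cons k t ih =>
    intro cs la h
    have hpt : (fun (c : Int) (a : String) =>
          (if PySem.Str.isIn (PySem.Str.lower k) a then c + 1 else c) + pvScoreL t a)
        = (fun (c : Int) (a : String) => c + pvScoreL (k :: t) a) := by
      funext c a
      unfold pvScoreL
      simp only [List.map_cons, List.sum_cons]
      split_ifs <;> ring
    rw [List.foldl_cons, ih _ la (by rw [List.length_zipWith]; omega),
        zipWith_zipWith_left, hpt]

theorem zip_replicate_zero {α : Type} (g : α → Int) : ∀ (la : List α),
    List.zipWith (fun c a => c + g a) (List.replicate la.length (0 : Int)) la = la.map g := by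
  intro la
  induction la with
  | nil => simp
  | cons a t ih => simp [List.replicate, ih]

theorem le_foldl_max_init (l : List Int) (s : Int) : s ≤ l.foldl max s := by
  induction l generalizing s with
  | nil => simp
  | cons x t ih => exact le_trans (le_max_left s x) (ih (max s x))

-- characterization of A's running-best loop
theorem loopA_spec (f : String → Int) (va : List String) :
    ∀ (i : Int) (b : Option Int) (s : Int),
    (PySem.List.enumerate va i).foldl
      (fun (st : Option Int × Int) p => if st.2 < f p.2 then (some p.1, f p.2) else st) (b, s)
    = (if (va.map f).foldl max s ≤ s then b
       else some (i + ((va.map f).idxOf ((va.map f).foldl max s) : Int)),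
       (va.map f).foldl max s) := by
  induction va with
  | nil => intro i b s; simp [PySem.List.enumerate_nil]
  | cons x t ih =>
    intro i b s
    rw [PySem.List.enumerate_cons, List.foldl_cons]
    by_cases h : s < f x
    · simp only [h, if_pos]
      rw [ih (i + 1) (some i) (f x)]
      have hmax : max s (f x) = f x := max_eq_right (le_of_lt h)
      simp only [List.map_cons, List.foldl_cons, hmax]
      have hge : f x ≤ (t.map f).foldl max (f x) := le_foldl_max_init _ _
      by_cases h2 : (t.map f).foldl max (f x) ≤ f x
      · have heq : (t.map f).foldl max (f x) = f x := le_antisymm h2 hge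
        rw [heq]
        simp [not_le.mpr h, List.idxOf_cons_self]
      · have hne : ¬ ((t.map f).foldl max (f x) ≤ s) := by omega
        have hbne : (f x) ≠ (t.map f).foldl max (f x) := by omega
        rw [if_neg h2, if_neg hne, List.idxOf_cons_ne _ hbne]
        simp only [Prod.mk.injEq, Option.some.injEq]
        exact ⟨by push_cast; ring, trivial⟩
    · simp only [h, if_neg, not_false_eq_true]
      rw [ih (i + 1) b s]
      have hmax : max s (f x) = s := max_eq_left (not_lt.mp h)
      simp only [List.map_cons, List.foldl_cons, hmax]
      by_cases h2 : (t.map f).foldl max s ≤ s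
      · simp [h2]
      · have hbne : (f x) ≠ (t.map f).foldl max s := by
          have := not_lt.mp h; omega
        rw [if_neg h2, if_neg h2, List.idxOf_cons_ne _ hbne]
        simp only [Prod.mk.injEq, Option.some.injEq]
        exact ⟨by push_cast; ring, trivial⟩

theorem index?_of_mem {l : List Int} {m : Int} (h : m ∈ l) :
    PySem.List.index? l m = some (l.idxOf m) := by
  rw [PySem.List.index?_eq_idxOf?]
  induction l with
  | nil => cases h
  | cons x t ih =>
    by_cases hx : x = m
    · subst hx; simp [List.idxOf?_cons, List.idxOf_cons_self]
    · have hm : m ∈ t := by cases h with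
        | head => exact absurd rfl hx
        | tail _ h' => exact h'
      simp [List.idxOf?_cons, hx, ih hm, beq_iff_eq]

-- ===== VERDICT =====
theorem best_action_matching_py_spec : Claim_equal_best_action_matching_py := by
  intro va ks _
  unfold Spec_best_action_matching_py best_action_matching_py best_action_matching_py_alt
  have hstep :
      (fun (st : Option Int × Int) (p : Int × String) =>
        let action_lower := PySem.Str.lower p.2
        let score : Int := ks.foldl
          (fun acc kw => if PySem.Str.isIn (PySem.Str.lower kw) action_lower then acc + 1 else acc) 0
        if st.2 < score then (some p.1, score) else st)
      = (fun (st : Option Int × Int) (p : Int × String) =>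
          if st.2 < pvScoreL ks (PySem.Str.lower p.2) then (some p.1, pvScoreL ks (PySem.Str.lower p.2)) else st) := by
    funext st p
    simp only [scoreA_eq]
  rw [hstep, loopA_spec (fun a => pvScoreL ks (PySem.Str.lower a)) va 0 none 0]
  have hcounts : ks.foldl
      (fun cs kw => List.zipWith
        (fun c a => if PySem.Str.isIn (PySem.Str.lower kw) a then c + 1 else c) cs (va.map PySem.Str.lower))
      (List.replicate va.length (0 : Int))
    = va.map (fun a => pvScoreL ks (PySem.Str.lower a)) := by
    rw [countsB_eq ks _ _ (by simp)]
    simpa [List.map_map, Function.comp] using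
      zip_replicate_zero (pvScoreL ks) (va.map PySem.Str.lower)
  simp only []
  rw [hcounts]
  cases hva : va with
  | nil => simp [PySem.List.max?]
  | cons a t =>
    simp only [List.map_cons]
    rw [PySem.List.max?_id_cons]
    set f := fun a => pvScoreL ks (PySem.Str.lower a) with hf
    set l := (t.map f) with hl
    have ha0 : 0 ≤ f a := pvScoreL_nonneg ks _
    have hM : (f a :: l).foldl max 0 = l.foldl max (f a) := by
      simp [List.foldl_cons, max_eq_right ha0]
    rw [hM]
    set m := l.foldl max (f a) with hm
    have hm0 : 0 ≤ m := le_trans ha0 (le_foldl_max_init _ _)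
    by_cases hz : 0 < m
    · have hmle : ¬ (m ≤ 0) := not_le.mpr hz
      simp only [hz, if_pos, hmle, if_neg, not_false_eq_true]
      have hmem : m ∈ f a :: l := by
        have : PySem.List.max? (f a :: l) (fun x => x) = some m := by
          rw [PySem.List.max?_id_cons]
        exact PySem.List.max?_mem this
      rw [index?_of_mem hmem]
      simp [hf]
    · have hz' : m = 0 := by omega
      simp [hz']
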